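-- pv_equiv track=rewrite | github.com/michaelmunje/algorithms | ctci/ch5/5-3.py | max_flip_sequence
-- ===== SOURCE A (Python) =====
-- def max_flip_sequence(a):
--
--     sequence = []
--     at_ones = False
--     sequence.append(0)
--
--     for i in range(32):
--         bit = a >> i & 1
--         if bit == 1:
--             if at_ones:
--                 sequence[-1] += 1
--             else:
--                 sequence.append(1)
--                 at_ones = True
--         else:
--             if at_ones:
--                 sequence.append(1)
--                 at_ones = False
--             else:
--                 sequence[-1] += 1
--
--     curr_max = 0
--
--     for i in range(2, len(sequence) - 1, 2):
--         if sequence[i] == 1: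
--             if sequence[i-1] + sequence[i+1] + 1 > curr_max:
--                 curr_max = sequence[i-1] + sequence[i+1] + 1
--
--     return curr_max
-- ===== SOURCE B (Python) =====
-- def max_flip_sequence(a):
--     # One-pass scan over the 32 bits keeping run bookkeeping in four scalars
--     # instead of materializing the run-length-encoded sequence and re-scanning it.
--     p = 0      # length of the ones-run just before the most recent zero-run
--     c = 0      # length of the current ones-run
--     z = 0      # length of the most recent zero-run
--     best = 0
--     for i in range(32):
--         bit = a >> i & 1
--         if bit == 1:
--             c += 1
--             if z == 1 and p > 0 and p + c + 1 > best:
--                 best = p + c + 1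
--         else:
--             if c > 0:
--                 p = c
--                 z = 1
--                 c = 0
--             else:
--                 z += 1
--     return best
-- ===== Notes on version B (the rewrite author's own statement) =====
-- stated objective: simpler
-- what changed: B replaces A's two-phase algorithm (build a run-length-encoded list of the 32 bits, then scan its interior entries) by a single pass over the bits that keeps only four scalars (previous ones-run, current ones-run, last zero-run length, best) and updates the maximum on the fly.
import Mathlib
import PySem

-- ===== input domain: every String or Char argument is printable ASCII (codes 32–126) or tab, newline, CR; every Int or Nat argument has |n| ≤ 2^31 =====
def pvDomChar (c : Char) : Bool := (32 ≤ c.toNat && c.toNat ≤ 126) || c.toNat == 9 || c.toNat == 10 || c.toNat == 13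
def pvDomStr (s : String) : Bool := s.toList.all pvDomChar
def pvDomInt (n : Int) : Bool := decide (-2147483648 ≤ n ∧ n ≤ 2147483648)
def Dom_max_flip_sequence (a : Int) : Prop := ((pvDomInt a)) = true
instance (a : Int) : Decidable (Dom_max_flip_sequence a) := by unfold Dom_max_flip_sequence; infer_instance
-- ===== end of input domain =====

-- B folds the 32 bits once with four scalar accumulators instead of A's RLE list + second scan (objective: simpler).


-- ===== PORT A =====
-- bit = a >> i & 1  (shared literal subexpression of both Pythons)
def pvBit (a : Int) (i : Int) : Int := PySem.Int.band (a >>> i.toNat) 1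

-- sequence[-1] += 1  (the list is never empty in A)
def pvIncLast (xs : List Int) : List Int := xs.dropLast ++ [xs.getLastD 0 + 1]

-- sequence[i]  (all accesses are in range in A)
def pvIdx (xs : List Int) (i : Int) : Int := PySem.List.pyGetD xs i 0

-- body of A's first loop, on the state (sequence, at_ones), reading bit
def pvCoreA (st : List Int × Bool) (bit : Int) : List Int × Bool :=
  if bit = 1 then
    if st.2 then (pvIncLast st.1, st.2) else (st.1 ++ [1], true)
  else
    if st.2 then (st.1 ++ [1], false) else (pvIncLast st.1, st.2)

def pvStepA (a : Int) (st : List Int × Bool) (i : Int) : List Int × Bool :=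
  pvCoreA st (pvBit a i)

-- body of A's second loop
def pvUpd (seq : List Int) (curr_max i : Int) : Int :=
  if pvIdx seq i = 1 then
    if pvIdx seq (i - 1) + pvIdx seq (i + 1) + 1 > curr_max then
      pvIdx seq (i - 1) + pvIdx seq (i + 1) + 1
    else curr_max
  else curr_max

-- A's second loop: for i in range(2, len(sequence) - 1, 2)
def pvSLoop (seq : List Int) : Int :=
  (PySem.List.pyRange 2 ((seq.length : Int) - 1) 2).foldl (pvUpd seq) 0

def max_flip_sequence (a : Int) : Int :=
  pvSLoop (((PySem.List.pyRange 0 32 1).foldl (pvStepA a) ([0], false)).1)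

-- ===== PORT B =====
-- body of B's single loop on the state (p, c, z, best), reading bit
def pvCoreB (st : Int × Int × Int × Int) (bit : Int) : Int × Int × Int × Int :=
  let (p, c, z, best) := st
  if bit = 1 then
    let c' := c + 1
    if z = 1 ∧ p > 0 ∧ p + c' + 1 > best then (p, c', z, p + c' + 1) else (p, c', z, best)
  else
    if c > 0 then (c, 0, 1, best) else (p, c, z + 1, best)

def pvStepB (a : Int) (st : Int × Int × Int × Int) (i : Int) : Int × Int × Int × Int :=
  pvCoreB st (pvBit a i)

def max_flip_sequence_alt (a : Int) : Int :=
  ((PySem.List.pyRange 0 32 1).foldl (pvStepB a) (0, 0, 0, 0)).2.2.2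

-- ===== PRECONDITION & SPEC =====
def Spec_max_flip_sequence (a : Int) (out : Int) : Prop := out = max_flip_sequence_alt a
instance (a : Int) (out : Int) : Decidable (Spec_max_flip_sequence a out) := by unfold Spec_max_flip_sequence; infer_instance

-- ===== CLAIM (what is proved, stated in full; the proofs are below) =====
def Claim_equal_max_flip_sequence : Prop := ∀ (a : Int), Dom_max_flip_sequence a → Spec_max_flip_sequence a (max_flip_sequence a)

-- ===== LEMMAS AND PROOFS =====

-- prefix of A's second loop: the first t visited indices 2, 4, …, 2t
def pvP (seq : List Int) (t : Nat) : Int :=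
  (List.range t).foldl (fun (m : Int) (k : Nat) => pvUpd seq m (2 + 2 * (k : Int))) 0

-- the coupling invariant between A's state (sequence, at_ones) and B's state (p, c, z, best)
def pvInv (stA : List Int × Bool) (stB : Int × Int × Int × Int) : Prop :=
  stB.2.2.2 = pvSLoop stA.1 ∧
  (stA.2 = true →
     1 ≤ stB.2.1 ∧
     ((stB.1 = 0 ∧ stA.1 = [stB.2.2.1, stB.2.1]) ∨
      ∃ f, stA.1 = f ++ [stB.1, stB.2.2.1, stB.2.1] ∧ 1 ≤ stB.1 ∧ f.length % 2 = 1)) ∧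
  (stA.2 = false →
     stB.2.1 = 0 ∧
     ((stB.1 = 0 ∧ stA.1 = [stB.2.2.1]) ∨
      ∃ f, stA.1 = f ++ [stB.1, stB.2.2.1] ∧ 1 ≤ stB.1 ∧ f.length % 2 = 1))

lemma pvBit_range (a i : Int) : pvBit a i = 0 ∨ pvBit a i = 1 := by
  unfold pvBit
  rw [PySem.Int.band_one]
  have h1 := PySem.Int.mod_nonneg (a >>> i.toNat) (b := 2) (by norm_num)
  have h2 := PySem.Int.mod_lt (a >>> i.toNat) (b := 2) (by norm_num)
  omega

lemma pvRange_two_nil (b : Int) (h : b ≤ 2) : PySem.List.pyRange 2 b 2 = [] := by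
  rw [PySem.List.pyRange_of_pos 2 b (by norm_num), if_neg (by omega)]
  simp

lemma pvSLoop_small (seq : List Int) (h : seq.length ≤ 3) : pvSLoop seq = 0 := by
  unfold pvSLoop
  rw [pvRange_two_nil _ (by omega)]
  rfl

lemma pvSLoop_eq_P (seq : List Int) :
    pvSLoop seq = pvP seq (((seq.length : Int) - 2) / 2).toNat := by
  unfold pvSLoop pvP
  rw [PySem.List.pyRange_of_pos 2 _ (by norm_num), List.foldl_map]
  have e : (if (2:Int) < (seq.length : Int) - 1 then
      (((seq.length : Int) - 1 - 2 + 2 - 1) / 2).toNat else 0) =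
      (((seq.length : Int) - 2) / 2).toNat := by
    split_ifs with h
    · congr 1
      omega
    · omega
  rw [e]

lemma pvP_succ (seq : List Int) (t : Nat) :
    pvP seq (t + 1) = pvUpd seq (pvP seq t) (2 + 2 * (t : Int)) := by
  unfold pvP
  rw [List.range_succ, List.foldl_append]
  rfl

lemma pvIdx_cast (xs : List Int) (n : Nat) : pvIdx xs (n : Int) = xs.getD n 0 := by
  simp [pvIdx]

lemma pvIdx_append (u v : List Int) (k : Nat) :
    pvIdx (u ++ v) ((u.length + k : Nat) : Int) = v.getD k 0 := by
  rw [pvIdx_cast, List.getD_eq_getElem?_getD, List.getElem?_append_right (Nat.le_add_right _ _)]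
  simp [List.getD_eq_getElem?_getD]

lemma pvUpd_congr (s s' : List Int) (m i : Int)
    (h : pvIdx s (i - 1) = pvIdx s' (i - 1)) (h2 : pvIdx s i = pvIdx s' i)
    (h3 : pvIdx s (i + 1) = pvIdx s' (i + 1)) : pvUpd s m i = pvUpd s' m i := by
  unfold pvUpd
  rw [h, h2, h3]

lemma pvGetD_shared (u v v' : List Int) (j : Nat) (h : j < u.length) :
    (u ++ v).getD j 0 = (u ++ v').getD j 0 := by
  rw [List.getD_eq_getElem?_getD, List.getD_eq_getElem?_getD,
      List.getElem?_append_left h, List.getElem?_append_left h]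

lemma pvP_congr (s s' : List Int) (t : Nat)
    (h : ∀ j : Nat, j < 2 * t + 2 → s.getD j 0 = s'.getD j 0) : pvP s t = pvP s' t := by
  induction t with
  | zero => rfl
  | succ t ih =>
      rw [pvP_succ, pvP_succ, ih (fun j hj => h j (by omega))]
      apply pvUpd_congr
      · have e : (2 + 2 * (t : Int)) - 1 = ((2 * t + 1 : Nat) : Int) := by push_cast; ring
        rw [e, pvIdx_cast, pvIdx_cast, h _ (by omega)]
      · have e : (2 + 2 * (t : Int)) = ((2 * t + 2 : Nat) : Int) := by push_cast; ring
        rw [e, pvIdx_cast, pvIdx_cast, h _ (by omega)]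
      · have e : (2 + 2 * (t : Int)) + 1 = ((2 * t + 3 : Nat) : Int) := by push_cast; ring
        rw [e, pvIdx_cast, pvIdx_cast, h _ (by omega)]

-- evaluating A's loop body at the index of the zero-run z in f ++ p :: z :: c :: rest
lemma pvUpd_eval (f : List Int) (p z c m : Int) (rest : List Int) :
    pvUpd (f ++ p :: z :: c :: rest) m ((f.length + 1 : Nat) : Int) =
      if z = 1 then (if p + c + 1 > m then p + c + 1 else m) else m := by
  have h0 : pvIdx (f ++ p :: z :: c :: rest) (((f.length + 1 : Nat) : Int) - 1) = p := by
    have e : (((f.length + 1 : Nat) : Int)) - 1 = ((f.length + 0 : Nat) : Int) := by push_cast; ring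
    rw [e, pvIdx_append]; rfl
  have h1 : pvIdx (f ++ p :: z :: c :: rest) ((f.length + 1 : Nat) : Int) = z := by
    rw [pvIdx_append]; rfl
  have h2 : pvIdx (f ++ p :: z :: c :: rest) (((f.length + 1 : Nat) : Int) + 1) = c := by
    have e : (((f.length + 1 : Nat) : Int)) + 1 = ((f.length + 2 : Nat) : Int) := by push_cast; ring
    rw [e, pvIdx_append]; rfl
  unfold pvUpd
  rw [h0, h1, h2]

lemma pvP_prefix (u v v' : List Int) (t : Nat) (h : 2 * t + 2 ≤ u.length) :
    pvP (u ++ v) t = pvP (u ++ v') t :=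
  pvP_congr _ _ _ (fun j hj => pvGetD_shared u v v' j (by omega))

-- closed form of A's second loop on a sequence ending p :: z :: c :: rest (|rest| ≤ 1)
lemma pvSLoop_big (f : List Int) (p z c : Int) (rest : List Int)
    (hl : f.length % 2 = 1) (hrest : rest.length ≤ 1) :
    pvSLoop (f ++ p :: z :: c :: rest) =
      if z = 1 then
        (if p + c + 1 > pvP (f ++ [p]) (f.length / 2) then p + c + 1
         else pvP (f ++ [p]) (f.length / 2))
      else pvP (f ++ [p]) (f.length / 2) := by
  rw [pvSLoop_eq_P]
  have hq : ((((f ++ p :: z :: c :: rest).length : Int) - 2) / 2).toNat = f.length / 2 + 1 := by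
    simp only [List.length_append, List.length_cons]
    omega
  rw [hq, pvP_succ]
  have e : (2 : Int) + 2 * ((f.length / 2 : Nat) : Int) = ((f.length + 1 : Nat) : Int) := by
    push_cast
    omega
  rw [e, pvUpd_eval]
  have hpre : f ++ p :: z :: c :: rest = (f ++ [p]) ++ (z :: c :: rest) := by simp
  rw [hpre, pvP_prefix (f ++ [p]) (z :: c :: rest) [] _ (by simp; omega), List.append_nil]

-- closed form of A's second loop on a sequence ending p :: z :: rest (|rest| ≤ 1): no candidate at the final zero-run
lemma pvSLoop_mid (f : List Int) (p : Int) (rest : List Int)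
    (hl : f.length % 2 = 1) (hrest : rest.length ≤ 1) :
    pvSLoop (f ++ p :: rest) = pvP (f ++ [p]) (f.length / 2) := by
  rw [pvSLoop_eq_P]
  have hq : ((((f ++ p :: rest).length : Int) - 2) / 2).toNat = f.length / 2 := by
    simp only [List.length_append, List.length_cons]
    omega
  rw [hq]
  have hpre : f ++ p :: rest = (f ++ [p]) ++ rest := by simp
  rw [hpre, pvP_prefix (f ++ [p]) rest [] _ (by simp; omega), List.append_nil]

lemma pvIncLast_concat (xs : List Int) (x : Int) : pvIncLast (xs ++ [x]) = xs ++ [x + 1] := by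
  simp [pvIncLast]

-- the single-step preservation of the coupling invariant
lemma pvStepInv (b : Int) (hb : b = 0 ∨ b = 1) (stA : List Int × Bool)
    (stB : Int × Int × Int × Int) (h : pvInv stA stB) :
    pvInv (pvCoreA stA b) (pvCoreB stB b) := by
  obtain ⟨seq, at1⟩ := stA
  obtain ⟨p, c, z, best⟩ := stB
  obtain ⟨hbest, hT, hF⟩ := h
  dsimp only at hbest
  cases at1 with
  | false =>
    obtain ⟨hc, hsh⟩ := hF rfl
    dsimp only at hc hsh
    subst hc
    rcases hb with rfl | rfl
    · -- bit = 0, at_ones = false: sequence[-1] += 1 ; z += 1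
      have hA : pvCoreA (seq, false) 0 = (pvIncLast seq, false) := by simp [pvCoreA]
      have hB : pvCoreB (p, 0, z, best) 0 = (p, 0, z + 1, best) := by simp [pvCoreB]
      rw [hA, hB]
      rcases hsh with ⟨hp, rfl⟩ | ⟨f, rfl, hp, hl⟩
      · refine ⟨?_, by simp, fun _ => ⟨rfl, Or.inl ⟨hp, ?_⟩⟩⟩
        · have e : pvIncLast [z] = [z + 1] := by simp [pvIncLast]
          dsimp only
          rw [e, pvSLoop_small _ (by simp), hbest, pvSLoop_small _ (by simp)]
        · have e : pvIncLast [z] = [z + 1] := by simp [pvIncLast]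
          dsimp only
          rw [e]
      · have e : pvIncLast (f ++ [p, z]) = f ++ [p, z + 1] := by
          have e1 : f ++ [p, z] = (f ++ [p]) ++ [z] := by simp
          rw [e1, pvIncLast_concat]
          simp
        refine ⟨?_, by simp, fun _ => ⟨rfl, Or.inr ⟨f, ?_, hp, hl⟩⟩⟩
        · dsimp only
          rw [e, pvSLoop_mid f p [z + 1] hl (by simp), hbest,
            pvSLoop_mid f p [z] hl (by simp)]
        · dsimp only
          rw [e]
    · -- bit = 1, at_ones = false: sequence.append(1) ; candidate check
      have hA : pvCoreA (seq, false) 1 = (seq ++ [1], true) := by simp [pvCoreA]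
      rw [hA]
      rcases hsh with ⟨hp, rfl⟩ | ⟨f, rfl, hp, hl⟩
      · subst hp
        have hB : pvCoreB (0, 0, z, best) 1 = (0, 0 + 1, z, best) := by
          simp [pvCoreB]
        rw [hB]
        refine ⟨?_, fun _ => ⟨by norm_num, Or.inl ⟨rfl, by simp⟩⟩, by simp⟩
        dsimp only
        rw [pvSLoop_small _ (by simp), hbest, pvSLoop_small _ (by simp)]
      · by_cases hcond : z = 1 ∧ p > 0 ∧ p + (0 + 1) + 1 > best
        · have hB : pvCoreB (p, 0, z, best) 1 = (p, 0 + 1, z, p + (0 + 1) + 1) := by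
            simp only [pvCoreB]
            rw [if_pos trivial, if_pos hcond]
          rw [hB]
          refine ⟨?_, fun _ => ⟨by norm_num, Or.inr ⟨f, by simp, hp, hl⟩⟩, by simp⟩
          dsimp only
          have e1 : f ++ [p, z] ++ [1] = f ++ p :: z :: 1 :: [] := by simp
          rw [e1, pvSLoop_big f p z 1 [] hl (by simp)]
          rw [pvSLoop_mid f p [z] hl (by simp)] at hbest
          obtain ⟨hz, hp0, hgt⟩ := hcond
          rw [if_pos hz]
          split_ifs with hgt2
          · omega
          · omega
        · have hB : pvCoreB (p, 0, z, best) 1 = (p, 0 + 1, z, best) := by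
            simp only [pvCoreB]
            rw [if_pos trivial, if_neg hcond]
          rw [hB]
          refine ⟨?_, fun _ => ⟨by norm_num, Or.inr ⟨f, by simp, hp, hl⟩⟩, by simp⟩
          dsimp only
          have e1 : f ++ [p, z] ++ [1] = f ++ p :: z :: 1 :: [] := by simp
          rw [e1, pvSLoop_big f p z 1 [] hl (by simp)]
          rw [pvSLoop_mid f p [z] hl (by simp)] at hbest
          split_ifs with hz hgt2
          · omega
          · omega
          · omega
  | true =>
    obtain ⟨hc1, hsh⟩ := hT rfl
    dsimp only at hc1 hsh
    rcases hb with rfl | rfl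
    · -- bit = 0, at_ones = true: sequence.append(1) ; p, z, c := c, 1, 0
      have hA : pvCoreA (seq, true) 0 = (seq ++ [1], false) := by simp [pvCoreA]
      have hB : pvCoreB (p, c, z, best) 0 = (c, 0, 1, best) := by
        simp only [pvCoreB]
        rw [if_neg (by norm_num), if_pos (by omega)]
      rw [hA, hB]
      rcases hsh with ⟨hp, rfl⟩ | ⟨f, rfl, hp, hl⟩
      · refine ⟨?_, by simp, fun _ => ⟨rfl, Or.inr ⟨[z], by simp, hc1, by simp⟩⟩⟩
        dsimp only
        rw [pvSLoop_small _ (by simp), hbest, pvSLoop_small _ (by simp)]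
      · refine ⟨?_, by simp, fun _ => ⟨rfl, Or.inr ⟨f ++ [p, z], by simp, hc1, by simp; omega⟩⟩⟩
        dsimp only
        have e1 : f ++ [p, z, c] ++ [1] = f ++ p :: z :: c :: [1] := by simp
        rw [e1, pvSLoop_big f p z c [1] hl (by simp)]
        rw [pvSLoop_big f p z c [] hl (by simp)] at hbest
        exact hbest
    · -- bit = 1, at_ones = true: sequence[-1] += 1 ; candidate check
      rcases hsh with ⟨hp, rfl⟩ | ⟨f, rfl, hp, hl⟩
      · subst hp
        have hA : pvCoreA ([z, c], true) 1 = (pvIncLast [z, c], true) := by simp [pvCoreA]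
        have hB : pvCoreB (0, c, z, best) 1 = (0, c + 1, z, best) := by
          simp [pvCoreB]
        have e : pvIncLast [z, c] = [z, c + 1] := by simp [pvIncLast]
        rw [hA, hB, e]
        refine ⟨?_, fun _ => ⟨by dsimp only; omega, Or.inl ⟨rfl, rfl⟩⟩, by simp⟩
        dsimp only
        rw [pvSLoop_small _ (by simp), hbest, pvSLoop_small _ (by simp)]
      · have hA : pvCoreA (f ++ [p, z, c], true) 1 = (pvIncLast (f ++ [p, z, c]), true) := by
          simp [pvCoreA]
        have e : pvIncLast (f ++ [p, z, c]) = f ++ [p, z, c + 1] := by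
          have e1 : f ++ [p, z, c] = (f ++ [p, z]) ++ [c] := by simp
          rw [e1, pvIncLast_concat]
          simp
        rw [hA, e]
        rw [pvSLoop_big f p z c [] hl (by simp)] at hbest
        by_cases hcond : z = 1 ∧ p > 0 ∧ p + (c + 1) + 1 > best
        · have hB : pvCoreB (p, c, z, best) 1 = (p, c + 1, z, p + (c + 1) + 1) := by
            simp only [pvCoreB]
            rw [if_pos trivial, if_pos hcond]
          rw [hB]
          refine ⟨?_, fun _ => ⟨by dsimp only; omega, Or.inr ⟨f, rfl, hp, hl⟩⟩, by simp⟩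
          dsimp only
          have e1 : f ++ [p, z, c + 1] = f ++ p :: z :: (c + 1) :: [] := by simp
          rw [e1, pvSLoop_big f p z (c + 1) [] hl (by simp)]
          obtain ⟨hz, hp0, hgt⟩ := hcond
          rw [if_pos hz]
          rw [if_pos hz] at hbest
          split_ifs with hgt2
          · omega
          · split_ifs at hbest <;> omega
        · have hB : pvCoreB (p, c, z, best) 1 = (p, c + 1, z, best) := by
            simp only [pvCoreB]
            rw [if_pos trivial, if_neg hcond]
          rw [hB]
          refine ⟨?_, fun _ => ⟨by dsimp only; omega, Or.inr ⟨f, rfl, hp, hl⟩⟩, by simp⟩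
          dsimp only
          have e1 : f ++ [p, z, c + 1] = f ++ p :: z :: (c + 1) :: [] := by simp
          rw [e1, pvSLoop_big f p z (c + 1) [] hl (by simp)]
          split_ifs with hz hgt2
          · rw [if_pos hz] at hbest
            split_ifs at hbest <;> omega
          · rw [if_pos hz] at hbest
            split_ifs at hbest <;> omega
          · rw [if_neg hz] at hbest
            omega

lemma pvFoldInv (a : Int) (L : List Int) (stA : List Int × Bool) (stB : Int × Int × Int × Int)
    (h : pvInv stA stB) : pvInv (L.foldl (pvStepA a) stA) (L.foldl (pvStepB a) stB) := by
  induction L generalizing stA stB with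
  | nil => exact h
  | cons i L ih =>
      exact ih _ _ (pvStepInv _ (pvBit_range a i) _ _ h)

lemma pvInv_init : pvInv ([0], false) (0, 0, 0, 0) := by
  refine ⟨?_, by simp, by simp⟩
  rw [pvSLoop_small _ (by simp)]

-- ===== VERDICT (by name: the statement is the Claim_ definition above) =====
theorem max_flip_sequence_spec : Claim_equal_max_flip_sequence := by
  intro a _
  show _ = _
  unfold max_flip_sequence max_flip_sequence_alt
  exact (pvFoldInv a (PySem.List.pyRange 0 32 1) _ _ pvInv_init).1.symm
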